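-- pv_equiv track=rewrite | github.com/erikmoura/trabalho-IA | tecnica-classica.py | constroi_grafo_reverso
-- ===== SOURCE A (Python) =====
-- from collections import defaultdict
--
-- def constroi_grafo_reverso(lista_arestas):
--     grafo_reverso = defaultdict(list)
--     grau_entrada = defaultdict(int)
--
--     for aresta in lista_arestas:
--         origem, destino = aresta.split("->")
--         origem = origem.strip()
--         destino = destino.strip()
--
--         grafo_reverso[destino].append(origem)
--         grau_entrada[destino] += 1  # conta quantos chegam no destino
--
--     return grafo_reverso, grau_entrada
-- ===== SOURCE B (Python) =====
-- from collections import defaultdict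
--
-- def constroi_grafo_reverso(lista_arestas):
--     # parse every edge once into (origem, destino) pairs
--     pares = [(origem.strip(), destino.strip())
--              for origem, destino in (aresta.split("->") for aresta in lista_arestas)]
--     # distinct destinations in first-occurrence order
--     destinos = list(dict.fromkeys(destino for _, destino in pares))
--     # group-by-destination: one scan of the pair list per distinct destination
--     grafo_reverso = defaultdict(list)
--     grau_entrada = defaultdict(int)
--     for destino in destinos:
--         grafo_reverso[destino] = [origem for origem, d in pares if d == destino]
--         grau_entrada[destino] = sum(1 for _, d in pares if d == destino)
--     return grafo_reverso, grau_entrada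
-- ===== Notes on version B (the rewrite author's own statement) =====
-- stated objective: alternative
-- what changed: B parses all edges into (origem, destino) pairs once, deduplicates the destinations with dict.fromkeys, and then builds each predecessor list and in-degree by a per-destination scan of the pair list (group-by via dedup+filter), instead of A's single loop that incrementally updates both defaultdicts per edge.
import Mathlib
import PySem

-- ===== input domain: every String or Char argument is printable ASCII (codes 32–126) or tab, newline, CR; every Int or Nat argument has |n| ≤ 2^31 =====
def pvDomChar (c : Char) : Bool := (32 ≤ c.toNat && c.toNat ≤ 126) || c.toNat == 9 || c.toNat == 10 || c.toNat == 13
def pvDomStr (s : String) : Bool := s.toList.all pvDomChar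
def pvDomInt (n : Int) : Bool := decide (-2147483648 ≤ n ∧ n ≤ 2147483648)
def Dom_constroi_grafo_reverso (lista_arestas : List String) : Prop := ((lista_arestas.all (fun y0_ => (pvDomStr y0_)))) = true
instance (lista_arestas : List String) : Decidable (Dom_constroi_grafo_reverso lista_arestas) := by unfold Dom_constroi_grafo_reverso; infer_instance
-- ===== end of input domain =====

-- B parses all edges into pairs once, dedups the destinations, then builds each
-- predecessor list and in-degree by scanning the pair list per distinct destination
-- (group-by via dedup+filter instead of A's incremental per-edge dict updates).


-- ===== PORT A =====
-- 'origem, destino = aresta.split("->")': Pre_ guarantees exactly two pieces; on any other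
-- shape Python raises ValueError, so the catch-all branch is never reached inside Pre_.
-- defaultdict access d[k].append(x) / d[k] += 1 is Dict.modify with default [] / 0.
def pvStepA (st : PySem.Dict String (List String) × PySem.Dict String Int) (aresta : String) :
    PySem.Dict String (List String) × PySem.Dict String Int :=
  match (PySem.Str.split? aresta "->").getD [] with
  | [origem, destino] =>
      (st.1.modify (PySem.Str.strip destino) [] (fun xs => xs ++ [PySem.Str.strip origem]),
       st.2.modify (PySem.Str.strip destino) 0 (fun n => n + 1))
  | _ => st

def constroi_grafo_reverso (lista_arestas : List String) : (List (String × List String)) × (List (String × Int)) :=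
  let st := lista_arestas.foldl pvStepA (PySem.Dict.empty, PySem.Dict.empty)
  (st.1.items, st.2.items)

-- ===== PORT B =====
-- 'origem, destino = …' unpacking in the comprehension also raises ValueError outside Pre_;
-- the catch-all branch is unreached inside Pre_.
def pvParse (aresta : String) : String × String :=
  match (PySem.Str.split? aresta "->").getD [] with
  | [origem, destino] => (PySem.Str.strip origem, PySem.Str.strip destino)
  | _ => ("", "")

-- list(dict.fromkeys(…)) is PySem.List.dedup; 'grafo_reverso[d] = …' / 'grau_entrada[d] = …'
-- on fresh keys is Dict.insert; the two comprehensions are filter+map / filter+map 1+sum.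
def constroi_grafo_reverso_alt (lista_arestas : List String) : (List (String × List String)) × (List (String × Int)) :=
  let pares := lista_arestas.map pvParse
  let destinos := PySem.List.dedup (pares.map (fun p => p.2))
  let st := destinos.foldl (fun (st : PySem.Dict String (List String) × PySem.Dict String Int) destino =>
      (st.1.insert destino ((pares.filter (fun p => p.2 == destino)).map (fun p => p.1)),
       st.2.insert destino (((pares.filter (fun p => p.2 == destino)).map (fun _ => (1 : Int))).sum)))
    (PySem.Dict.empty, PySem.Dict.empty)
  (st.1.items, st.2.items)

-- ===== PRECONDITION & SPEC =====
-- Pre_ excludes exactly the inputs on which Python A raises ValueError: an edge string whose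
-- split on "->" does not have exactly two pieces (no "->", or more than one).
def Pre_constroi_grafo_reverso (lista_arestas : List String) : Prop :=
  ∀ a ∈ lista_arestas, ((PySem.Str.split? a "->").getD []).length = 2
instance (lista_arestas : List String) : Decidable (Pre_constroi_grafo_reverso lista_arestas) := by
  unfold Pre_constroi_grafo_reverso; infer_instance
def pvWitness_constroi_grafo_reverso : List String := ["a->b", " b -> c", "a->b"]
def Spec_constroi_grafo_reverso (lista_arestas : List String) (out : (List (String × List String)) × (List (String × Int))) : Prop := out = constroi_grafo_reverso_alt lista_arestas
instance (lista_arestas : List String) (out : (List (String × List String)) × (List (String × Int))) : Decidable (Spec_constroi_grafo_reverso lista_arestas out) := by unfold Spec_constroi_grafo_reverso; infer_instance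

-- ===== CLAIM (what is proved, stated in full; the proofs are below) =====
def Claim_equal_constroi_grafo_reverso : Prop := ∀ (lista_arestas : List String), Dom_constroi_grafo_reverso lista_arestas → Pre_constroi_grafo_reverso lista_arestas → Spec_constroi_grafo_reverso lista_arestas (constroi_grafo_reverso lista_arestas)

-- ===== LEMMAS AND PROOFS =====

-- A's edge as a (destino, origem) pair, matching the key-first shape of the Dict grouping lemmas
def pvSwap (aresta : String) : String × String := ((pvParse aresta).2, (pvParse aresta).1)

-- under Pre_, A's fold over edge strings is a fold over the parsed (destino, origem) pairs
theorem pv_foldA_pairs (l : List String)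
    (hp : ∀ a ∈ l, ((PySem.Str.split? a "->").getD []).length = 2)
    (st : PySem.Dict String (List String) × PySem.Dict String Int) :
    l.foldl pvStepA st
      = (l.map pvSwap).foldl
          (fun st p => (st.1.modify p.1 [] (fun xs => xs ++ [p.2]),
                        st.2.modify p.1 0 (fun n => n + 1))) st := by
  induction l generalizing st with
  | nil => rfl
  | cons a l ih =>
    have ha := hp a (by simp)
    rcases h : (PySem.Str.split? a "->").getD [] with _ | ⟨o, _ | ⟨d, _ | _⟩⟩ <;>
      simp [h] at ha
    simp only [List.map_cons, List.foldl_cons, pvStepA, pvSwap, pvParse, h]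
    exact ih (fun a ha => hp a (by simp [ha])) _

-- ===== VERDICT (by name: the statement is the Claim_ definition above) =====
theorem constroi_grafo_reverso_spec : Claim_equal_constroi_grafo_reverso := by
  intro l _ hp
  unfold Spec_constroi_grafo_reverso
  simp only [constroi_grafo_reverso, constroi_grafo_reverso_alt]
  rw [pv_foldA_pairs l hp]
  rw [PySem.List.foldl_prod_mk
    (f := fun (d : PySem.Dict String (List String)) (p : String × String) =>
      d.modify p.1 [] (fun xs => xs ++ [p.2]))
    (g := fun (d : PySem.Dict String Int) (p : String × String) => d.modify p.1 0 (fun n => n + 1))]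
  rw [PySem.List.foldl_prod_mk
    (f := fun (d : PySem.Dict String (List String)) destino =>
      d.insert destino (((l.map pvParse).filter (fun p => p.2 == destino)).map (fun p => p.1)))
    (g := fun (d : PySem.Dict String Int) destino =>
      d.insert destino ((((l.map pvParse).filter (fun p => p.2 == destino)).map (fun _ => (1 : Int))).sum))]
  have hkeys : (l.map pvSwap).map (fun p => p.1) = (l.map pvParse).map (fun p => p.2) := by
    simp [pvSwap, List.map_map, Function.comp]
  refine congrArg₂ Prod.mk ?_ ?_
  · -- the reverse-adjacency dicts have the same items
    have hnd :
        ((l.map pvSwap).foldl (fun d p => d.modify p.1 [] (fun xs => xs ++ [p.2]))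
          (PySem.Dict.empty : PySem.Dict String (List String))).keys.Nodup :=
      PySem.Dict.nodup_keys_foldl_modify_key (l.map pvSwap) (fun p => p.1) []
        (fun _ p xs => xs ++ [p.2]) PySem.Dict.empty PySem.Dict.nodup_keys_empty
    rw [PySem.Dict.items_eq_map_keys _ hnd []]
    rw [PySem.Dict.keys_foldl_modify_key (l.map pvSwap) (fun p => p.1) []
        (fun _ p xs => xs ++ [p.2]) PySem.Dict.empty]
    rw [PySem.Dict.items_foldl_insert_fresh _ (fun d => d) _ _
        (fun a _ => PySem.Dict.contains_empty a) (by simp)]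
    simp only [hkeys, PySem.List.dedup_eq_ofList, PySem.Dict.empty]
    refine List.map_congr_left (fun d _ => ?_)
    rw [PySem.Dict.getD_foldl_modify_append]
    simp [pvSwap, List.filter_map, Function.comp_def]
    rfl
  · -- the in-degree dicts have the same items
    rw [← List.foldl_map (f := fun p : String × String => p.1)
        (g := fun (d : PySem.Dict String Int) x => d.modify x 0 (fun n => n + 1)),
      ← PySem.Dict.counter_eq_foldl, PySem.Dict.items_counter]
    rw [PySem.Dict.items_foldl_insert_fresh _ (fun d => d) _ _
        (fun a _ => PySem.Dict.contains_empty a) (by simp)]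
    simp only [hkeys, PySem.List.dedup_eq_ofList, PySem.Dict.empty]
    refine List.map_congr_left (fun d _ => ?_)
    simp [List.count_eq_countP, List.countP_eq_length_filter, List.filter_map, Function.comp_def]
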